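-- pv_equiv track=rewrite | github.com/KangMinHyeok/irredicator | utils/utils.py | binary2prefix
-- ===== SOURCE A (Python) =====
-- def binary2prefix(binary_prefix):
--     prefix_len = len(binary_prefix)
--     binary_prefix += "0" * (32 - prefix_len)
--     prefix_addr = ""
--     for i in range(4):
--         if i != 0: prefix_addr += '.'
--         prefix_addr += str(int(binary_prefix[:8], 2))
--         binary_prefix = binary_prefix[8:]
--
--     return '{}/{}'.format(prefix_addr, prefix_len)
-- ===== SOURCE B (Python) =====
-- def binary2prefix(binary_prefix):
--     padded = binary_prefix.ljust(32, '0')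
--     addr = 0
--     for i in range(0, 32, 8):
--         addr = addr * 256 + int(padded[i:i + 8], 2)
--     octets = []
--     for _ in range(4):
--         addr, r = divmod(addr, 256)
--         octets.append(str(r))
--     return '.'.join(reversed(octets)) + '/' + str(len(binary_prefix))
-- ===== Notes on version B (the rewrite author's own statement) =====
-- stated objective: alternative
-- what changed: A slices 8 characters off the bit string per loop iteration and builds the dotted address by string concatenation with a conditional dot; B packs the four parsed octet values into ONE 32-bit integer address and then formats that address arithmetically, extracting octets back-to-front by repeated divmod(addr,256) and joining the reversed parts.
-- outside the precondition, e.g. on binary2prefix('-1'): A returns '-64.0.0.0/2', B returns '192.0.0.0/2'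
import Mathlib
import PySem

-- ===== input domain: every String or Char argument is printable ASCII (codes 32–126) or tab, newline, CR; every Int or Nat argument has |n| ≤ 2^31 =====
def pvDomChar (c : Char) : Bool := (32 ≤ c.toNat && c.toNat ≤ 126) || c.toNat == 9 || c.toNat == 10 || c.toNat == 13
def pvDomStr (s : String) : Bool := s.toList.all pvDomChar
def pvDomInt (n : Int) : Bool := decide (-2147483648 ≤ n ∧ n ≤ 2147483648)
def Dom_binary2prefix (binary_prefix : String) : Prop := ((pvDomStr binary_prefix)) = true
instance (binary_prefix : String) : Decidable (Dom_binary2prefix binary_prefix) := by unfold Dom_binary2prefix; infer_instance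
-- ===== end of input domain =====

-- B replaces A's slice-off-8-chars string loop with conditional-dot concatenation by packing the
-- four octet values into ONE 32-bit integer address and formatting that address by back-to-front
-- divmod(·,256) extraction and a join of the reversed parts (alternative decomposition, same cost).

-- ===== PORT A =====
-- loop body of 'for i in range(4)'; state = (prefix_addr, binary_prefix).
-- int(s, 2) is PySem.Int.ofCharsBase? (none = ValueError, excluded by Pre_); .getD 0 totalises.
def binary2prefixLoop (st : List Char × List Char) (i : Int) : List Char × List Char :=
  let addr := if i ≠ 0 then st.1 ++ ['.'] else st.1
  let v := (PySem.Int.ofCharsBase? (PySem.List.slice st.2 none (some 8)) 2).getD 0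
  (addr ++ PySem.Int.toChars v, PySem.List.slice st.2 (some 8) none)

-- '"0" * (32 - prefix_len)': Python repeats 0 times for a negative count, exactly as .toNat clamps.
def binary2prefix (binary_prefix : String) : String :=
  let prefixLen : Int := PySem.Str.len binary_prefix
  let bp := binary_prefix.toList ++ List.replicate (32 - prefixLen).toNat '0'
  let res := (PySem.List.pyRange 0 4 1).foldl binary2prefixLoop ([], bp)
  String.ofList (res.1 ++ '/' :: PySem.Int.toChars prefixLen)

-- ===== PORT B =====
-- s.ljust(32, '0') has no PySem primitive; ported by hand as right-padding with '0' up to length 32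
-- (exact: ljust never truncates, Nat subtraction clamps at 0 like Python's padding).
-- int(chunk, 2) is PySem.Int.ofCharsBase?, .getD 0 totalises; divmod(n, 256) = (floordiv, mod), total.
def binary2prefix_alt (binary_prefix : String) : String :=
  let padded := binary_prefix.toList ++ List.replicate (32 - binary_prefix.toList.length) '0'
  let addr := (PySem.List.pyRange 0 32 8).foldl
      (fun a i => a * 256 +
        (PySem.Int.ofCharsBase? (PySem.List.slice padded (some i) (some (i + 8))) 2).getD 0) 0
  let res := (PySem.List.pyRange 0 4 1).foldl
      (fun (st : Int × List (List Char)) (_ : Int) =>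
        (PySem.Int.floordiv st.1 256, st.2 ++ [PySem.Int.toChars (PySem.Int.mod st.1 256)]))
      (addr, [])
  String.ofList (PySem.Chars.join ['.'] res.2.reverse
      ++ '/' :: PySem.Int.toChars (PySem.Str.len binary_prefix))

-- ===== PRECONDITION & SPEC =====
-- Pre_ requires each 8-character group of the zero-padded first 32 characters to parse as a base-2
-- int with a value in 0..255.  Parse failure is exactly where A raises ValueError; the upper bound
-- is automatic for 8 binary digits; the lower bound excludes groups that parse to a negative value
-- via an explicit minus sign, a degenerate corner with no specified behaviour: A renders the
-- negative chunk value and B renders the packed 32-bit address, both defensible, neither a valid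
-- dotted quad.
def Pre_binary2prefix (binary_prefix : String) : Prop :=
  let p := binary_prefix.toList ++ List.replicate (32 - binary_prefix.toList.length) '0'
  let v := fun i : Nat => (PySem.Int.ofCharsBase? ((p.drop i).take 8) 2).getD (-1)
  (0 ≤ v 0 ∧ v 0 < 256) ∧ (0 ≤ v 8 ∧ v 8 < 256) ∧ (0 ≤ v 16 ∧ v 16 < 256) ∧ (0 ≤ v 24 ∧ v 24 < 256)
-- Typical admitted inputs are "01" bit strings (of any length; only the first 32 characters count).
instance (binary_prefix : String) : Decidable (Pre_binary2prefix binary_prefix) := by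
  unfold Pre_binary2prefix; infer_instance

def pvWitness_binary2prefix : String := "1100"

def Spec_binary2prefix (binary_prefix : String) (out : String) : Prop := out = binary2prefix_alt binary_prefix
instance (binary_prefix : String) (out : String) : Decidable (Spec_binary2prefix binary_prefix out) := by unfold Spec_binary2prefix; infer_instance

-- ===== CLAIM (what is proved, stated in full; the proofs are below) =====
def Claim_equal_binary2prefix : Prop := ∀ (binary_prefix : String), Dom_binary2prefix binary_prefix → Pre_binary2prefix binary_prefix → Spec_binary2prefix binary_prefix (binary2prefix binary_prefix)

-- ===== LEMMAS AND PROOFS =====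

-- A's 4-iteration loop, computed: four 8-char slices, parsed and dot-joined
lemma aloop (p : List Char) :
    (PySem.List.pyRange 0 4 1).foldl binary2prefixLoop ([], p)
      = (PySem.Int.toChars ((PySem.Int.ofCharsBase? (p.take 8) 2).getD 0)
          ++ '.' :: PySem.Int.toChars ((PySem.Int.ofCharsBase? ((p.drop 8).take 8) 2).getD 0)
          ++ '.' :: PySem.Int.toChars ((PySem.Int.ofCharsBase? ((p.drop 16).take 8) 2).getD 0)
          ++ '.' :: PySem.Int.toChars ((PySem.Int.ofCharsBase? ((p.drop 24).take 8) 2).getD 0),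
         p.drop 32) := by
  have hr : PySem.List.pyRange 0 4 1 = [0, 1, 2, 3] := by decide
  rw [hr]
  simp [binary2prefixLoop, PySem.List.slice_to, PySem.List.slice_from, List.drop_drop]

-- B's slice padded[i:i+8] for a concrete nonnegative offset
lemma bslice (p : List Char) (i : Int) (hi : 0 ≤ i) :
    PySem.List.slice p (some i) (some (i + 8)) = (p.drop i.toNat).take 8 := by
  rw [PySem.List.slice_toNat p hi (by omega)]
  congr 1
  omega

-- a parse whose default -1 is beaten is a successful parse, with the same value under default 0
lemma getD_pos (o : Option Int) (h : 0 ≤ o.getD (-1)) : o = some (o.getD 0) := by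
  cases o with
  | none => simp at h
  | some v => rfl

set_option maxHeartbeats 1000000 in
theorem binary2prefix_spec : Claim_equal_binary2prefix := by
  intro s _ hpre
  unfold Pre_binary2prefix at hpre
  unfold Spec_binary2prefix binary2prefix binary2prefix_alt
  simp only [PySem.Str.len_eq]
  have htn : ((32 : Int) - (s.toList.length : Int)).toNat = 32 - s.toList.length := by omega
  rw [htn]
  set p := s.toList ++ List.replicate (32 - s.toList.length) '0' with hp
  simp only [List.drop_zero] at hpre
  obtain ⟨⟨h0l, h0r⟩, ⟨h8l, h8r⟩, ⟨h16l, h16r⟩, ⟨h24l, h24r⟩⟩ := hpre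
  -- the four octet values
  have e0 := getD_pos _ h0l
  have e8 := getD_pos _ h8l
  have e16 := getD_pos _ h16l
  have e24 := getD_pos _ h24l
  set v0 := (PySem.Int.ofCharsBase? (p.take 8) 2).getD 0 with hv0
  set v1 := (PySem.Int.ofCharsBase? ((p.drop 8).take 8) 2).getD 0 with hv1
  set v2 := (PySem.Int.ofCharsBase? ((p.drop 16).take 8) 2).getD 0 with hv2
  set v3 := (PySem.Int.ofCharsBase? ((p.drop 24).take 8) 2).getD 0 with hv3
  rw [e0] at h0l h0r; rw [e8] at h8l h8r; rw [e16] at h16l h16r; rw [e24] at h24l h24r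
  simp only [Option.getD_some] at h0l h0r h8l h8r h16l h16r h24l h24r
  -- A's side
  rw [aloop p]
  -- B's side: the packing loop
  have hr32 : PySem.List.pyRange 0 32 8 = [0, 8, 16, 24] := by decide
  rw [hr32]
  simp only [List.foldl_cons, List.foldl_nil]
  rw [bslice p 0 (by norm_num), bslice p 8 (by norm_num), bslice p 16 (by norm_num),
      bslice p 24 (by norm_num)]
  have t0 : ((0:Int).toNat) = 0 := rfl
  have t8 : ((8:Int).toNat) = 8 := rfl
  have t16 : ((16:Int).toNat) = 16 := rfl
  have t24 : ((24:Int).toNat) = 24 := rfl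
  rw [t0, t8, t16, t24, List.drop_zero, ← hv0, ← hv1, ← hv2, ← hv3]
  -- B's side: the four divmod(·,256) steps recover the octets
  have hr4 : PySem.List.pyRange 0 4 1 = [0, 1, 2, 3] := by decide
  rw [hr4]
  simp only [List.foldl_cons, List.foldl_nil, List.nil_append, List.cons_append]
  have h256 : (0:Int) < 256 := by norm_num
  have m1 : PySem.Int.mod ((((0 * 256 + v0) * 256 + v1) * 256 + v2) * 256 + v3) 256 = v3 := by
    rw [PySem.Int.mod_eq_emod_of_pos h256]; omega
  have d1 : PySem.Int.floordiv ((((0 * 256 + v0) * 256 + v1) * 256 + v2) * 256 + v3) 256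
      = ((0 * 256 + v0) * 256 + v1) * 256 + v2 := by
    rw [PySem.Int.floordiv_eq_ediv_of_pos h256]; omega
  rw [m1, d1]
  have m2 : PySem.Int.mod (((0 * 256 + v0) * 256 + v1) * 256 + v2) 256 = v2 := by
    rw [PySem.Int.mod_eq_emod_of_pos h256]; omega
  have d2 : PySem.Int.floordiv (((0 * 256 + v0) * 256 + v1) * 256 + v2) 256
      = (0 * 256 + v0) * 256 + v1 := by
    rw [PySem.Int.floordiv_eq_ediv_of_pos h256]; omega
  rw [m2, d2]
  have m3 : PySem.Int.mod ((0 * 256 + v0) * 256 + v1) 256 = v1 := by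
    rw [PySem.Int.mod_eq_emod_of_pos h256]; omega
  have d3 : PySem.Int.floordiv ((0 * 256 + v0) * 256 + v1) 256 = 0 * 256 + v0 := by
    rw [PySem.Int.floordiv_eq_ediv_of_pos h256]; omega
  rw [m3, d3]
  have m4 : PySem.Int.mod (0 * 256 + v0) 256 = v0 := by
    rw [PySem.Int.mod_eq_emod_of_pos h256]; omega
  rw [m4]
  -- assemble the joined string
  congr 1
  simp [PySem.Chars.join, List.intercalate, List.intersperse, List.append_assoc]
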